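-- pv_equiv track=rewrite | github.com/JoeOnTheMission/DSA | 1889-check-if-number-is-a-sum-of-powers-of-three/check-if-number-is-a-sum-of-powers-of-three.py | checkPowersOfThree
-- ===== SOURCE A (Python) =====
-- def checkPowersOfThree(n: int) -> bool:
--     def number_to_ternary(n):
--         ternary_digits = []
--         while n > 0:
--             remainder = n % 3
--             ternary_digits.append(remainder)
--             n //= 3
--         return ternary_digits
--     ternary_version = number_to_ternary(n)
--     two_present = ternary_version.count(2) > 0
--     if two_present:
--         return False
--     else:
--         return True
-- ===== SOURCE B (Python) =====
-- def checkPowersOfThree(n: int) -> bool: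
--     p = 1
--     while 3 * p <= n:
--         p *= 3
--     while p > 0:
--         if p <= n:
--             n -= p
--         p //= 3
--     return n == 0
-- ===== Notes on version B (the rewrite author's own statement) =====
-- stated objective: alternative
-- what changed: A extracts the base-3 digits bottom-up into a list with a nested helper and then scans the list with .count(2); B never looks at digits: it finds the largest power of three <= n, then greedily subtracts each power at most once going down, and checks the residue is zero (greedy is correct because all smaller powers sum to less than the next power).
-- outside the precondition, e.g. on checkPowersOfThree(-7): A returns True, B returns False
import Mathlib
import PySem

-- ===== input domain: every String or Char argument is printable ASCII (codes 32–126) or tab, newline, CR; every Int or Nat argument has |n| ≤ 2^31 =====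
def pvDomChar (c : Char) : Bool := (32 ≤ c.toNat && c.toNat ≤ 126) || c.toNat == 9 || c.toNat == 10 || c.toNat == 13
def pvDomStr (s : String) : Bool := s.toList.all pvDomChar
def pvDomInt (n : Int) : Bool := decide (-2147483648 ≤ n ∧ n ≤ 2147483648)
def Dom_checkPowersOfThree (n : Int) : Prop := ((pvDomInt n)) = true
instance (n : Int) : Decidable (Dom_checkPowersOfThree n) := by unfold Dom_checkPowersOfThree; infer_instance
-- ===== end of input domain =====

-- B replaces A's digit-list construction + count scan by top-down greedy subtraction of powers of three (objective: alternative).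

-- ===== PORT A =====
-- number_to_ternary: builds the list of ternary digits of n (low digit first)
def pvTernary (n : Int) : List Int :=
  if h : n > 0 then
    PySem.Int.mod n 3 :: pvTernary (PySem.Int.floordiv n 3)
  else []
termination_by n.toNat
decreasing_by
  have h3 : PySem.Int.floordiv n 3 = n / 3 := PySem.Int.floordiv_eq_ediv_of_pos (by omega)
  rw [h3]; omega

def checkPowersOfThree (n : Int) : Bool :=
  let ternary_version := pvTernary n
  let two_present := ternary_version.count 2 > 0
  if two_present then false else true

-- ===== PORT B =====
-- first loop: grow p until 3*p <= n fails
-- (the '0 < p' conjunct is a totality guard only; along the real call chain p starts at 1 and stays positive)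
def pvGrowPow (n p : Int) : Int :=
  if h : 3 * p ≤ n ∧ 0 < p then pvGrowPow n (3 * p) else p
termination_by (n - p).toNat
decreasing_by omega

-- second loop: subtract each power at most once while p > 0
def pvGreedy (n p : Int) : Int :=
  if h : 0 < p then
    pvGreedy (if p ≤ n then n - p else n) (PySem.Int.floordiv p 3)
  else n
termination_by p.toNat
decreasing_by
  have h3 : PySem.Int.floordiv p 3 = p / 3 := PySem.Int.floordiv_eq_ediv_of_pos (by omega)
  have hd : 3 * (p / 3) + p % 3 = p := Int.ediv_add_emod p 3
  have h0 : 0 ≤ p % 3 := Int.emod_nonneg p (by norm_num)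
  have h1 : p % 3 < 3 := Int.emod_lt_of_pos p (by norm_num)
  omega

def checkPowersOfThree_alt (n : Int) : Bool :=
  let p := pvGrowPow n 1
  decide (pvGreedy n p = 0)

-- ===== PRECONDITION & SPEC =====
-- Pre_ excludes negative n, which is outside the task's natural domain (a sum of powers of
-- three is a question about nonnegative integers): A's digit loop runs zero times there and
-- vacuously returns True, while B's greedy residue stays negative and it returns False.
def Pre_checkPowersOfThree (n : Int) : Prop := 0 ≤ n
instance (n : Int) : Decidable (Pre_checkPowersOfThree n) := by unfold Pre_checkPowersOfThree; infer_instance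
def pvWitness_checkPowersOfThree : Int := (12)

def Spec_checkPowersOfThree (n : Int) (out : Bool) : Prop := out = checkPowersOfThree_alt n
instance (n : Int) (out : Bool) : Decidable (Spec_checkPowersOfThree n out) := by unfold Spec_checkPowersOfThree; infer_instance

-- ===== CLAIM (what is proved, stated in full; the proofs are below) =====
def Claim_equal_checkPowersOfThree : Prop := ∀ (n : Int), Dom_checkPowersOfThree n → Pre_checkPowersOfThree n → Spec_checkPowersOfThree n (checkPowersOfThree n)

-- ===== LEMMAS AND PROOFS =====

-- streaming characterisation of A: no ternary digit equals 2
def pvNo2 (n : Int) : Bool :=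
  if h : n > 0 then
    if PySem.Int.mod n 3 = 2 then false else pvNo2 (PySem.Int.floordiv n 3)
  else true
termination_by n.toNat
decreasing_by
  have h3 : PySem.Int.floordiv n 3 = n / 3 := PySem.Int.floordiv_eq_ediv_of_pos (by omega)
  rw [h3]; omega

theorem pvNo2_unfold (n : Int) :
    pvNo2 n = if n > 0 then (if n % 3 = 2 then false else pvNo2 (n / 3)) else true := by
  rw [pvNo2, PySem.Int.mod_eq_emod_of_pos (by norm_num), PySem.Int.floordiv_eq_ediv_of_pos (by norm_num)]
  split_ifs <;> rfl

theorem pvNo2_nonpos (n : Int) (h : ¬ n > 0) : pvNo2 n = true := by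
  rw [pvNo2_unfold, if_neg h]

theorem checkPowersOfThree_eq_no2 (n : Int) : checkPowersOfThree n = pvNo2 n := by
  induction n using pvTernary.induct with
  | case1 n h ih =>
    unfold checkPowersOfThree at ih ⊢
    rw [pvTernary, pvNo2, dif_pos h, dif_pos h]
    rw [PySem.Int.mod_eq_emod_of_pos (a := n) (b := 3) (by omega)]
    rw [PySem.Int.floordiv_eq_ediv_of_pos (a := n) (b := 3) (by omega)] at ih ⊢
    by_cases h2 : n % 3 = 2
    · simp [h2]
    · rw [if_neg h2, ← ih]
      have hc : List.count 2 (n % 3 :: pvTernary (n / 3)) = List.count 2 (pvTernary (n / 3)) := by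
        rw [List.count_cons, if_neg (by simpa using h2)]
        omega
      simp only [hc]
  | case2 n h =>
    unfold checkPowersOfThree
    rw [pvTernary, pvNo2, dif_neg h, dif_neg h]
    simp

theorem pvGreedy_unfold (p n : Int) (hp : 0 < p) :
    pvGreedy n p = pvGreedy (if p ≤ n then n - p else n) (p / 3) := by
  rw [pvGreedy, dif_pos hp, PySem.Int.floordiv_eq_ediv_of_pos (by norm_num)]

theorem pvGreedy_nonpos (n p : Int) (hp : ¬ 0 < p) : pvGreedy n p = n := by
  rw [pvGreedy, dif_neg hp]

theorem pow_succ_div (k : Nat) : (3:Int) ^ (k + 1) / 3 = 3 ^ k := by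
  rw [pow_succ]
  exact Int.mul_ediv_cancel _ (by norm_num)

theorem pow_pos3 (k : Nat) : (0:Int) < 3 ^ k := by positivity

-- lower bound: greedy with p = 3^k subtracts at most (3^(k+1)-1)/2 in total
theorem pvGreedy_lower (k : Nat) : ∀ n : Int, 2 * pvGreedy n ((3:Int) ^ k) ≥ 2 * n - ((3:Int) ^ (k + 1) - 1) := by
  induction k with
  | zero =>
    intro n
    rw [pvGreedy_unfold _ _ (by norm_num)]
    norm_num
    rw [pvGreedy_nonpos _ _ (by norm_num)]
    split_ifs <;> omega
  | succ k ih =>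
    intro n
    rw [pvGreedy_unfold _ _ (pow_pos3 (k+1)), pow_succ_div]
    have h3 : (3:Int) ^ (k + 1 + 1) = 3 * 3 ^ (k + 1) := by ring
    split_ifs with hle
    · have := ih (n - 3 ^ (k + 1)); omega
    · have := ih n
      have h1 : (1:Int) ≤ 3 ^ (k + 1) := (pow_pos3 (k+1))
      omega

-- digit lemma: subtracting a leading 1 does not change lower digits
theorem pvNo2_sub_pow (k : Nat) : ∀ n : Int, (3:Int) ^ k ≤ n → n < 2 * 3 ^ k → pvNo2 n = pvNo2 (n - 3 ^ k) := by
  induction k with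
  | zero =>
    intro n h1 h2
    have : n = 1 := by norm_num at h1 h2; omega
    subst this
    norm_num
    rw [pvNo2_unfold, if_pos (by norm_num), if_neg (by norm_num),
      show (1:Int)/3 = 0 from by decide, pvNo2_nonpos 0 (by norm_num)]
  | succ k ih =>
    intro n h1 h2
    have hk1 : (1:Int) ≤ 3 ^ k := pow_pos3 k
    have hs : (3:Int) ^ (k + 1) = 3 * 3 ^ k := by ring
    have hn : 0 < n := by rw [hs] at h1; omega
    have hd : 3 * (n / 3) + n % 3 = n := Int.ediv_add_emod n 3
    have hm0 : 0 ≤ n % 3 := Int.emod_nonneg n (by norm_num)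
    have hm1 : n % 3 < 3 := Int.emod_lt_of_pos n (by norm_num)
    -- the subtracted value
    have hmodsub : (n - 3 ^ (k + 1)) % 3 = n % 3 := by
      rw [hs]
      omega
    have hdivsub : (n - 3 ^ (k + 1)) / 3 = n / 3 - 3 ^ k := by
      rw [hs]
      omega
    have hdivlo : (3:Int) ^ k ≤ n / 3 := by rw [hs] at h1; omega
    have hdivhi : n / 3 < 2 * 3 ^ k := by rw [hs] at h2; omega
    rw [pvNo2_unfold n, if_pos hn]
    by_cases hz : 0 < n - 3 ^ (k + 1)
    · rw [pvNo2_unfold (n - 3 ^ (k+1)), if_pos hz, hmodsub, hdivsub, ih (n / 3) hdivlo hdivhi]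
    · have hzero : n - 3 ^ (k + 1) = 0 := by omega
      have hn3 : n = 3 ^ (k + 1) := by omega
      have hnd : n / 3 = 3 ^ k := by rw [hn3, pow_succ_div]
      have hnm : n % 3 = 0 := by rw [hs] at hn3; omega
      rw [pvNo2_nonpos _ hz, hnm, if_neg (by norm_num), hnd, ih (3 ^ k) le_rfl (by omega)]
      norm_num
      exact pvNo2_nonpos 0 (by norm_num)

-- a leading 2 forces the answer false
theorem pvNo2_two_lead (k : Nat) : ∀ n : Int, 2 * 3 ^ k ≤ n → n < (3:Int) ^ (k + 1) → pvNo2 n = false := by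
  induction k with
  | zero =>
    intro n h1 h2
    have : n = 2 := by norm_num at h1 h2; omega
    subst this
    rw [pvNo2_unfold, if_pos (by norm_num), if_pos (by norm_num)]
  | succ k ih =>
    intro n h1 h2
    have hk1 : (1:Int) ≤ 3 ^ k := pow_pos3 k
    have hs : (3:Int) ^ (k + 1) = 3 * 3 ^ k := by ring
    have hs2 : (3:Int) ^ (k + 1 + 1) = 9 * 3 ^ k := by ring
    have hn : 0 < n := by rw [hs] at h1; omega
    have hd : 3 * (n / 3) + n % 3 = n := Int.ediv_add_emod n 3
    have hm0 : 0 ≤ n % 3 := Int.emod_nonneg n (by norm_num)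
    have hm1 : n % 3 < 3 := Int.emod_lt_of_pos n (by norm_num)
    have hlo : 2 * 3 ^ k ≤ n / 3 := by rw [hs] at h1; omega
    have hhi : n / 3 < 3 ^ (k + 1) := by rw [hs2] at h2; rw [hs]; omega
    rw [pvNo2_unfold, if_pos hn, ih (n / 3) hlo hhi]
    split_ifs <;> rfl

theorem pvGreedy_eq_no2 (k : Nat) : ∀ n : Int, 0 ≤ n → n < (3:Int) ^ (k + 1) → (decide (pvGreedy n ((3:Int) ^ k) = 0)) = pvNo2 n := by
  induction k with
  | zero =>
    intro n h0 h3
    norm_num at h3 ⊢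
    rw [pvGreedy_unfold _ _ (by norm_num)]
    norm_num
    rw [pvGreedy_nonpos _ _ (by norm_num)]
    interval_cases n
    · rw [if_neg (by norm_num), pvNo2_nonpos 0 (by norm_num)]; norm_num
    · rw [if_pos (by norm_num), pvNo2_unfold, if_pos (by norm_num), if_neg (by norm_num),
        show (1:Int)/3 = 0 from by decide, pvNo2_nonpos 0 (by norm_num)]
      norm_num
    · rw [if_pos (by norm_num), pvNo2_unfold, if_pos (by norm_num), if_pos (by norm_num)]
      norm_num
  | succ k ih =>
    intro n h0 hlt
    have hp : (0:Int) < 3 ^ (k + 1) := pow_pos3 (k+1)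
    have hk1 : (1:Int) ≤ 3 ^ (k + 1) := hp
    rw [pvGreedy_unfold _ _ hp, pow_succ_div]
    by_cases hge : 3 ^ (k + 1) ≤ n
    · rw [if_pos hge]
      by_cases h2 : n < 2 * 3 ^ (k + 1)
      · -- leading digit 1: recurse on the residue and use the digit lemma
        have := ih (n - 3 ^ (k + 1)) (by omega) (by omega)
        rw [this, pvNo2_sub_pow (k + 1) n hge h2]
      · -- leading digit 2: greedy residue stays positive, and pvNo2 is false
        have hlow := pvGreedy_lower k (n - 3 ^ (k + 1))
        have hne : pvGreedy (n - 3 ^ (k + 1)) ((3:Int) ^ k) ≠ 0 := by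
          omega
        rw [pvNo2_two_lead (k + 1) n (by omega) hlt]
        simpa using hne
    · rw [if_neg hge]
      exact ih n h0 (by omega)

-- growth lemma: pvGrowPow n 1 is a power of three 3^k with n < 3^(k+1)
theorem pvGrowPow_spec : ∀ n p : Int, 0 < p → ∃ k : Nat, pvGrowPow n p = p * 3 ^ k ∧ n < 3 * (p * 3 ^ k) := by
  intro n
  refine pvGrowPow.induct n (fun p => 0 < p → ∃ k : Nat, pvGrowPow n p = p * 3 ^ k ∧ n < 3 * (p * 3 ^ k)) ?_ ?_
  · intro p h ih _
    obtain ⟨k, hk, hlt⟩ := ih (by omega)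
    refine ⟨k + 1, ?_, ?_⟩
    · rw [pvGrowPow, dif_pos h, hk]; ring
    · have : p * 3 ^ (k + 1) = 3 * p * 3 ^ k := by ring
      omega
  · intro p h hp
    refine ⟨0, ?_, ?_⟩
    · rw [pvGrowPow, dif_neg h]; ring
    · have : ¬ (3 * p ≤ n) := fun hc => h ⟨hc, hp⟩
      norm_num
      omega

-- ===== VERDICT (by name: the statement is the Claim_ definition above) =====
theorem checkPowersOfThree_spec : Claim_equal_checkPowersOfThree := by
  intro n _ hn
  unfold Spec_checkPowersOfThree
  rw [checkPowersOfThree_eq_no2]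
  unfold checkPowersOfThree_alt
  obtain ⟨k, hk, hlt⟩ := pvGrowPow_spec n 1 (by norm_num)
  rw [hk]
  simp only [one_mul] at hk hlt ⊢
  have hup : n < (3:Int) ^ (k + 1) := by rw [pow_succ]; omega
  exact (pvGreedy_eq_no2 k n hn hup).symm
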